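-- pv_equiv track=rewrite | github.com/AniAmbroladze/Morphological-Opening-Closing | Homework_1.py | eroDil_Gray
-- ===== SOURCE A (Python) =====
-- def eroDil_Gray(imgFile,l,k,seFile,n,m,word):
--     """
--         The method performs erosion and dilation of a grayscale image with
--         respect to a structuring element 'SE'
--
--         :param imgFile: Matrix of the image
--         :param l: Number of rows of the image matrix
--         :param k: Number of columns of the image matrix
--         :param seFile: Maxtrix of SE
--         :param n: Number of rows of SE matrix
--         :param m: Number of columns of SE matrix
--         :param word: Character that indicates to the operation ('d'/'e')
--         :return: Eroded matrix/Dilated Matrix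
--     """
--     matrix = [[0 for x in range(k)] for y in range(l)]
--     if(m%2 != 0 and n%2 != 0):
--         col = int((m/2)-1/2)
--         row = int((n/2)-1/2)
--         seRow = row
--         seCol = col
--     else:
--         col = m-1
--         row = n-1
--         seRow = 0
--         seCol = 0
--     greyArr = list()
--     v = 0
--     while v != l:
--         h = 0
--         while h != k:
--             i = 0
--             while i <= row:
--                 j = -1
--                 while j < col:
--                     j = j + 1
--                     if(seFile[seRow+i][seCol+j]!=0 and (v+i < l) and (h+j < k)):
--                         greyArr.append(imgFile[v+i][h+j])
--
--                     if(seFile[seRow+i][seCol-j]!=0 and (v+i < l) and (h-j >= 0)):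
--                         greyArr.append(imgFile[v+i][h-j])
--
--                     if(seFile[seRow-i][seCol+j]!=0 and (v-i >= 0) and (h+j < k)):
--                         greyArr.append(imgFile[v-i][h+j])
--
--                     if(seFile[seRow-i][seCol-j]!=0 and (v-i >= 0) and (h-j >= 0)):
--                         greyArr.append(imgFile[v-i][h-j])
--                 i = i+1
--             if(word == 'd'):
--                 matrix[v][h] =  max(greyArr)
--             else:
--                 matrix[v][h] =  min(greyArr)
--             greyArr[:] = []
--             h = h+1
--         v = v+1
--     return matrix
-- ===== SOURCE B (Python) =====
-- def eroDil_Gray(imgFile, l, k, seFile, n, m, word):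
--     # Rectangular SE scan: one pass over the full reflected offset window
--     # builds the distinct active offsets, then each pixel takes max/min over
--     # its in-bounds neighbours for those offsets.
--     if l <= 0 or k <= 0:
--         return [[] for _ in range(l)]
--     if m % 2 != 0 and n % 2 != 0:
--         row = n // 2
--         col = m // 2
--         seRow, seCol = row, col
--     else:
--         row = n - 1
--         col = m - 1
--         seRow, seCol = 0, 0
--     offs = [(di, dj)
--             for di in range(-row, row + 1)
--             for dj in range(-col, col + 1)
--             if seFile[seRow + di][seCol + dj] != 0]
--     pick = max if word == 'd' else min
--     return [[pick(imgFile[v + di][h + dj]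
--                   for di, dj in offs
--                   if 0 <= v + di < l and 0 <= h + dj < k)
--              for h in range(k)]
--             for v in range(l)]
-- ===== Notes on version B (the rewrite author's own statement) =====
-- stated objective: alternative
-- what changed: B scans the full reflected SE window once as one rectangle, collecting the distinct active (di,dj) offsets, and then computes each output pixel by a single flat in-bounds pass over that offset table, instead of A's per-pixel nested four-quadrant SE loops with duplicated appends; max/min over the distinct offsets equals max/min over A's duplicate-carrying list.
import Mathlib
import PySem

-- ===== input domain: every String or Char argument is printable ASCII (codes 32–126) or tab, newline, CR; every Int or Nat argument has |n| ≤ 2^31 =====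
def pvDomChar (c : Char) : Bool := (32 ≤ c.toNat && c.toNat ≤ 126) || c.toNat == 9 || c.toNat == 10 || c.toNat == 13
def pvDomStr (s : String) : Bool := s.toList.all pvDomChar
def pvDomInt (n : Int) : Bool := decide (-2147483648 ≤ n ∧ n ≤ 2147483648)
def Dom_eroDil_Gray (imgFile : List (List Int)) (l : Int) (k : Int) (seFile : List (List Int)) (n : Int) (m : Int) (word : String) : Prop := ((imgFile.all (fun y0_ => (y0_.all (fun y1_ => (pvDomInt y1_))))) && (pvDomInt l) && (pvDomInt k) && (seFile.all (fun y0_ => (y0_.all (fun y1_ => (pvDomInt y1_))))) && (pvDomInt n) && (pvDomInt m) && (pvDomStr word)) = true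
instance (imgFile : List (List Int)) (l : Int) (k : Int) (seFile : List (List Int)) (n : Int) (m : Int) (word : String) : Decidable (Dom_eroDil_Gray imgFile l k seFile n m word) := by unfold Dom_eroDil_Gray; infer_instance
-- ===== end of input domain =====

-- ===== PORT A =====
-- B replaces A's per-pixel four-quadrant SE loops by one rectangular scan of the SE
-- collecting the distinct active offsets, then a flat in-bounds pass per pixel
-- (objective: alternative; same asymptotic cost).

-- xss[i][j] with Python negative indexing; in-range under Pre_, default never observed there
def pvAt (xss : List (List Int)) (i j : Int) : Int :=
  PySem.List.pyGetD (PySem.List.pyGetD xss i []) j 0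

-- the (row, col, seRow, seCol) block of A; for odd m the Python
-- float expression int((m/2)-1/2) equals (m-1)//2 exactly (m-1 even, |m| ≤ 2^31 < 2^53)
def pvParams (n m : Int) : Int × Int × Int × Int :=
  if PySem.Int.mod m 2 ≠ 0 ∧ PySem.Int.mod n 2 ≠ 0 then
    (PySem.Int.floordiv (n - 1) 2, PySem.Int.floordiv (m - 1) 2,
     PySem.Int.floordiv (n - 1) 2, PySem.Int.floordiv (m - 1) 2)
  else (n - 1, m - 1, 0, 0)

-- the four conditional appends of A's innermost loop body
def pvAstep (seFile imgFile : List (List Int)) (l k seRow seCol v h : Int)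
    (acc : List Int) (i j : Int) : List Int :=
  let a1 := if pvAt seFile (seRow + i) (seCol + j) ≠ 0 ∧ v + i < l ∧ h + j < k then
              acc ++ [pvAt imgFile (v + i) (h + j)] else acc
  let a2 := if pvAt seFile (seRow + i) (seCol - j) ≠ 0 ∧ v + i < l ∧ 0 ≤ h - j then
              a1 ++ [pvAt imgFile (v + i) (h - j)] else a1
  let a3 := if pvAt seFile (seRow - i) (seCol + j) ≠ 0 ∧ 0 ≤ v - i ∧ h + j < k then
              a2 ++ [pvAt imgFile (v - i) (h + j)] else a2
  if pvAt seFile (seRow - i) (seCol - j) ≠ 0 ∧ 0 ≤ v - i ∧ 0 ≤ h - j then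
    a3 ++ [pvAt imgFile (v - i) (h - j)] else a3

def eroDil_Gray (imgFile : List (List Int)) (l : Int) (k : Int) (seFile : List (List Int)) (n : Int) (m : Int) (word : String) : List (List Int) :=
  let p := pvParams n m
  let row := p.1
  let col := p.2.1
  let seRow := p.2.2.1
  let seCol := p.2.2.2
  (PySem.List.pyRange 0 l 1).map fun v =>
    (PySem.List.pyRange 0 k 1).map fun h =>
      let greyArr : List Int :=
        (PySem.List.pyRange 0 (row + 1) 1).foldl
          (fun acc i =>
            (PySem.List.pyRange 0 (col + 1) 1).foldl
              (fun acc j => pvAstep seFile imgFile l k seRow seCol v h acc i j) acc) []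
      if word == "d" then (PySem.List.max? greyArr (fun x => x)).getD 0
      else (PySem.List.min? greyArr (fun x => x)).getD 0

-- ===== PORT B =====
def eroDil_Gray_alt (imgFile : List (List Int)) (l : Int) (k : Int) (seFile : List (List Int)) (n : Int) (m : Int) (word : String) : List (List Int) :=
  if l ≤ 0 ∨ k ≤ 0 then (PySem.List.pyRange 0 l 1).map (fun _ => ([] : List Int)) else
  -- q = (row, col, seRow, seCol); Python's n // 2, m // 2
  let q : Int × Int × Int × Int :=
    if PySem.Int.mod m 2 ≠ 0 ∧ PySem.Int.mod n 2 ≠ 0 then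
      (PySem.Int.floordiv n 2, PySem.Int.floordiv m 2,
       PySem.Int.floordiv n 2, PySem.Int.floordiv m 2)
    else (n - 1, m - 1, 0, 0)
  -- one rectangular scan of the SE window: the distinct active (di, dj) offsets
  let offs : List (Int × Int) :=
    (PySem.List.pyRange (-q.1) (q.1 + 1) 1).flatMap fun di =>
      (PySem.List.pyRange (-q.2.1) (q.2.1 + 1) 1).filterMap fun dj =>
        if PySem.List.pyGetD (PySem.List.pyGetD seFile (q.2.2.1 + di) []) (q.2.2.2 + dj) 0 ≠ 0
        then some (di, dj) else none
  (PySem.List.pyRange 0 l 1).map fun v =>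
    (PySem.List.pyRange 0 k 1).map fun h =>
      let vals : List Int :=
        offs.filterMap fun p =>
          if 0 ≤ v + p.1 ∧ v + p.1 < l ∧ 0 ≤ h + p.2 ∧ h + p.2 < k
          then some (PySem.List.pyGetD (PySem.List.pyGetD imgFile (v + p.1) []) (h + p.2) 0)
          else none
      if word == "d" then (PySem.List.max? vals (fun x => x)).getD 0
      else (PySem.List.min? vals (fun x => x)).getD 0

-- ===== PRECONDITION & SPEC =====
-- the SE rows/columns A reads (unconditionally, incl. negative-index wraparound in the even case)
def pvSeShape (seFile : List (List Int)) (n m : Int) : Bool :=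
  decide (n ≤ (seFile.length : Int)) &&
  (seFile.take n.toNat).all (fun r => decide (m ≤ (r.length : Int))) &&
  (decide (PySem.Int.mod m 2 ≠ 0 ∧ PySem.Int.mod n 2 ≠ 0) ||
    (seFile.drop (seFile.length - (n - 1).toNat)).all (fun r => decide (m ≤ (r.length : Int))))

-- every pixel sees at least one active in-bounds SE offset (else A's max()/min() raises ValueError)
def pvCovered (l : Int) (k : Int) (seFile : List (List Int)) (n m : Int) : Bool :=
  (PySem.List.pyRange 0 l 1).all fun v =>
    (PySem.List.pyRange 0 k 1).all fun h =>
      (PySem.List.pyRange (-(pvParams n m).1) ((pvParams n m).1 + 1) 1).any fun di =>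
        (PySem.List.pyRange (-(pvParams n m).2.1) ((pvParams n m).2.1 + 1) 1).any fun dj =>
          pvAt seFile ((pvParams n m).2.2.1 + di) ((pvParams n m).2.2.2 + dj) != 0 &&
            decide (0 ≤ v + di ∧ v + di < l ∧ 0 ≤ h + dj ∧ h + dj < k)

-- Pre_ excludes exactly the inputs on which the Python A does not return: negative l, or
-- negative k with l > 0 (the while loops never terminate), a too-short image or SE
-- (IndexError on the rows/columns A reads), and a pixel with no active in-bounds SE offset
-- (ValueError from max()/min() on an empty list).
def Pre_eroDil_Gray (imgFile : List (List Int)) (l : Int) (k : Int) (seFile : List (List Int)) (n : Int) (m : Int) (word : String) : Prop :=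
  0 ≤ l ∧
  (l = 0 ∨ (0 ≤ k ∧ (k = 0 ∨
    (l ≤ (imgFile.length : Int) ∧ (∀ r ∈ imgFile.take l.toNat, k ≤ (r.length : Int)) ∧
     pvSeShape seFile n m = true ∧ pvCovered l k seFile n m = true))))
instance (imgFile : List (List Int)) (l : Int) (k : Int) (seFile : List (List Int)) (n : Int) (m : Int) (word : String) : Decidable (Pre_eroDil_Gray imgFile l k seFile n m word) := by unfold Pre_eroDil_Gray; infer_instance

def pvWitness_eroDil_Gray : List (List Int) × Int × Int × List (List Int) × Int × Int × String :=
  ([[1, 2], [3, 4]], 2, 2, [[1, 1], [1, 1]], 2, 2, "e")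

def Spec_eroDil_Gray (imgFile : List (List Int)) (l : Int) (k : Int) (seFile : List (List Int)) (n : Int) (m : Int) (word : String) (out : List (List Int)) : Prop := out = eroDil_Gray_alt imgFile l k seFile n m word
instance (imgFile : List (List Int)) (l : Int) (k : Int) (seFile : List (List Int)) (n : Int) (m : Int) (word : String) (out : List (List Int)) : Decidable (Spec_eroDil_Gray imgFile l k seFile n m word out) := by unfold Spec_eroDil_Gray; infer_instance

-- ===== CLAIM (what is proved, stated in full; the proofs are below) =====
def Claim_equal_eroDil_Gray : Prop := ∀ (imgFile : List (List Int)) (l : Int) (k : Int) (seFile : List (List Int)) (n : Int) (m : Int) (word : String), Dom_eroDil_Gray imgFile l k seFile n m word → Pre_eroDil_Gray imgFile l k seFile n m word → Spec_eroDil_Gray imgFile l k seFile n m word (eroDil_Gray imgFile l k seFile n m word)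

-- ===== LEMMAS AND PROOFS =====

-- for odd a, a // 2 = (a - 1) // 2
theorem pvFloordivOdd (a : Int) (h : PySem.Int.mod a 2 ≠ 0) :
    PySem.Int.floordiv a 2 = PySem.Int.floordiv (a - 1) 2 := by
  have h1 := PySem.Int.floordiv_mul_add_mod a 2
  have h2 := PySem.Int.floordiv_mul_add_mod (a - 1) 2
  have h3 : 0 ≤ PySem.Int.mod a 2 := PySem.Int.mod_nonneg a (by omega)
  have h4 : PySem.Int.mod a 2 < 2 := PySem.Int.mod_lt a (by omega)
  have h5 : 0 ≤ PySem.Int.mod (a - 1) 2 := PySem.Int.mod_nonneg (a - 1) (by omega)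
  have h6 : PySem.Int.mod (a - 1) 2 < 2 := PySem.Int.mod_lt (a - 1) (by omega)
  omega

-- B's parameter tuple equals A's
theorem pvParamsAlt (n m : Int) :
    (if PySem.Int.mod m 2 ≠ 0 ∧ PySem.Int.mod n 2 ≠ 0 then
      (PySem.Int.floordiv n 2, PySem.Int.floordiv m 2,
       PySem.Int.floordiv n 2, PySem.Int.floordiv m 2)
     else (n - 1, m - 1, (0 : Int), (0 : Int))) = pvParams n m := by
  unfold pvParams
  split_ifs with hc
  · rw [pvFloordivOdd n hc.2, pvFloordivOdd m hc.1]
  · rfl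

-- membership through a fold whose step conditionally appends
theorem pvMemFoldl {α β : Type} (f : List α → β → List α) (P : β → α → Prop)
    (hf : ∀ acc b x, x ∈ f acc b ↔ x ∈ acc ∨ P b x) :
    ∀ (L : List β) (acc : List α) (x : α),
      x ∈ L.foldl f acc ↔ x ∈ acc ∨ ∃ b ∈ L, P b x := by
  intro L
  induction L with
  | nil => simp
  | cons b t ih =>
    intro acc x
    simp only [List.foldl_cons, ih, hf, List.mem_cons]
    constructor
    · rintro (((h | h) | ⟨c, hc, hP⟩))
      · exact Or.inl h
      · exact Or.inr ⟨b, Or.inl rfl, h⟩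
      · exact Or.inr ⟨c, Or.inr hc, hP⟩
    · rintro (h | ⟨c, (rfl | hc), hP⟩)
      · exact Or.inl (Or.inl h)
      · exact Or.inl (Or.inr hP)
      · exact Or.inr ⟨c, hc, hP⟩

-- what one pvAstep iteration can contribute
def pvQ (seFile imgFile : List (List Int)) (l k seRow seCol v h i j : Int) (x : Int) : Prop :=
  ((pvAt seFile (seRow + i) (seCol + j) ≠ 0 ∧ v + i < l ∧ h + j < k) ∧ x = pvAt imgFile (v + i) (h + j)) ∨
  ((pvAt seFile (seRow + i) (seCol - j) ≠ 0 ∧ v + i < l ∧ 0 ≤ h - j) ∧ x = pvAt imgFile (v + i) (h - j)) ∨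
  ((pvAt seFile (seRow - i) (seCol + j) ≠ 0 ∧ 0 ≤ v - i ∧ h + j < k) ∧ x = pvAt imgFile (v - i) (h + j)) ∨
  ((pvAt seFile (seRow - i) (seCol - j) ≠ 0 ∧ 0 ≤ v - i ∧ 0 ≤ h - j) ∧ x = pvAt imgFile (v - i) (h - j))

-- one conditional append, membership
theorem pvMemCondApp (c : Prop) [Decidable c] (acc : List Int) (y x : Int) :
    x ∈ (if c then acc ++ [y] else acc) ↔ x ∈ acc ∨ (c ∧ x = y) := by
  split_ifs with hc <;> simp [hc]

theorem pvMemAstep (seFile imgFile : List (List Int)) (l k seRow seCol v h : Int)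
    (acc : List Int) (i j x : Int) :
    x ∈ pvAstep seFile imgFile l k seRow seCol v h acc i j ↔
      x ∈ acc ∨ pvQ seFile imgFile l k seRow seCol v h i j x := by
  simp only [pvAstep, pvQ, pvMemCondApp, or_assoc]

-- membership in A's greyArr, characterised
theorem pvMemGrey (seFile imgFile : List (List Int)) (l k row col seRow seCol v h x : Int) :
    (x ∈ (PySem.List.pyRange 0 (row + 1) 1).foldl
        (fun acc i =>
          (PySem.List.pyRange 0 (col + 1) 1).foldl
            (fun acc j => pvAstep seFile imgFile l k seRow seCol v h acc i j) acc) []) ↔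
      ∃ i, (0 ≤ i ∧ i < row + 1) ∧ ∃ j, (0 ≤ j ∧ j < col + 1) ∧
        pvQ seFile imgFile l k seRow seCol v h i j x := by
  rw [pvMemFoldl _ (fun i x => ∃ j ∈ PySem.List.pyRange 0 (col + 1) 1,
        pvQ seFile imgFile l k seRow seCol v h i j x)
      (fun acc i x => pvMemFoldl _ (pvQ seFile imgFile l k seRow seCol v h i)
        (fun acc j x => pvMemAstep seFile imgFile l k seRow seCol v h acc i j x) _ acc x)]
  simp [PySem.List.mem_pyRange_one]

-- membership in B's per-pixel value list, characterised
theorem pvMemVals (seFile imgFile : List (List Int)) (l k row col seRow seCol v h x : Int) :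
    (x ∈ ((PySem.List.pyRange (-row) (row + 1) 1).flatMap fun di =>
        (PySem.List.pyRange (-col) (col + 1) 1).filterMap fun dj =>
          if PySem.List.pyGetD (PySem.List.pyGetD seFile (seRow + di) []) (seCol + dj) 0 ≠ 0
          then some (di, dj) else none).filterMap fun p =>
        if 0 ≤ v + p.1 ∧ v + p.1 < l ∧ 0 ≤ h + p.2 ∧ h + p.2 < k
        then some (PySem.List.pyGetD (PySem.List.pyGetD imgFile (v + p.1) []) (h + p.2) 0)
        else none) ↔
      ∃ di, (-row ≤ di ∧ di < row + 1) ∧ ∃ dj, (-col ≤ dj ∧ dj < col + 1) ∧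
        pvAt seFile (seRow + di) (seCol + dj) ≠ 0 ∧
        (0 ≤ v + di ∧ v + di < l ∧ 0 ≤ h + dj ∧ h + dj < k) ∧
        x = pvAt imgFile (v + di) (h + dj) := by
  simp only [List.mem_filterMap, List.mem_flatMap, PySem.List.mem_pyRange_one, pvAt,
    Option.ite_none_right_eq_some, Option.some.injEq]
  constructor
  · rintro ⟨p, ⟨di, hdi, dj, hdj, hse, rfl⟩, hb, hx⟩
    exact ⟨di, hdi, dj, hdj, hse, hb, hx.symm⟩
  · rintro ⟨di, hdi, dj, hdj, hse, hb, rfl⟩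
    exact ⟨(di, dj), ⟨di, hdi, dj, hdj, hse, rfl⟩, hb, rfl⟩

-- the bridge: A's reflected four-branch enumeration = B's rectangular scan, per pixel
theorem pvBridge (seFile imgFile : List (List Int)) (l k row col seRow seCol v h x : Int)
    (hv : 0 ≤ v) (hvl : v < l) (hh : 0 ≤ h) (hhk : h < k) :
    (∃ i, (0 ≤ i ∧ i < row + 1) ∧ ∃ j, (0 ≤ j ∧ j < col + 1) ∧
        pvQ seFile imgFile l k seRow seCol v h i j x) ↔
      (∃ di, (-row ≤ di ∧ di < row + 1) ∧ ∃ dj, (-col ≤ dj ∧ dj < col + 1) ∧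
        pvAt seFile (seRow + di) (seCol + dj) ≠ 0 ∧
        (0 ≤ v + di ∧ v + di < l ∧ 0 ≤ h + dj ∧ h + dj < k) ∧
        x = pvAt imgFile (v + di) (h + dj)) := by
  constructor
  · rintro ⟨i, hi, j, hj, (⟨⟨hse, hb1, hb2⟩, rfl⟩ | ⟨⟨hse, hb1, hb2⟩, rfl⟩ |
      ⟨⟨hse, hb1, hb2⟩, rfl⟩ | ⟨⟨hse, hb1, hb2⟩, rfl⟩)⟩
    · exact ⟨i, by omega, j, by omega, hse, by omega, rfl⟩
    · refine ⟨i, by omega, -j, by omega, ?_, by omega, ?_⟩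
      · rwa [show seCol + -j = seCol - j by ring]
      · rw [show h + -j = h - j by ring]
    · refine ⟨-i, by omega, j, by omega, ?_, by omega, ?_⟩
      · rwa [show seRow + -i = seRow - i by ring]
      · rw [show v + -i = v - i by ring]
    · refine ⟨-i, by omega, -j, by omega, ?_, by omega, ?_⟩
      · rwa [show seRow + -i = seRow - i by ring, show seCol + -j = seCol - j by ring]
      · rw [show v + -i = v - i by ring, show h + -j = h - j by ring]
  · rintro ⟨di, hdi, dj, hdj, hse, hb, rfl⟩
    by_cases hdi0 : 0 ≤ di <;> by_cases hdj0 : 0 ≤ dj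
    · refine ⟨di, by omega, dj, by omega, Or.inl ⟨⟨hse, by omega, by omega⟩, rfl⟩⟩
    · refine ⟨di, by omega, -dj, by omega, Or.inr (Or.inl ⟨⟨?_, by omega, by omega⟩, ?_⟩)⟩
      · rwa [show seCol - -dj = seCol + dj by ring]
      · rw [show h - -dj = h + dj by ring]
    · refine ⟨-di, by omega, dj, by omega, Or.inr (Or.inr (Or.inl ⟨⟨?_, by omega, by omega⟩, ?_⟩))⟩
      · rwa [show seRow - -di = seRow + di by ring]
      · rw [show v - -di = v + di by ring]
    · refine ⟨-di, by omega, -dj, by omega, Or.inr (Or.inr (Or.inr ⟨⟨?_, by omega, by omega⟩, ?_⟩))⟩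
      · rwa [show seRow - -di = seRow + di by ring, show seCol - -dj = seCol + dj by ring]
      · rw [show v - -di = v + di by ring, show h - -dj = h + dj by ring]

-- max over a list of Ints depends only on which elements occur
theorem pvMaxExt (l1 l2 : List Int) (hmem : ∀ x, x ∈ l1 ↔ x ∈ l2) :
    (PySem.List.max? l1 (fun x => x)).getD 0 = (PySem.List.max? l2 (fun x => x)).getD 0 := by
  cases h1 : PySem.List.max? l1 (fun x => x) with
  | none =>
    have hl1 : l1 = [] := (PySem.List.max?_eq_none_iff _ _).mp h1
    have hl2 : l2 = [] := by
      cases h : l2 with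
      | nil => rfl
      | cons y t => exact absurd ((hmem y).mpr (h ▸ List.mem_cons_self ..)) (by simp [hl1])
    rw [(PySem.List.max?_eq_none_iff _ _).mpr hl2]
  | some m1 =>
    have hm1 : m1 ∈ l2 := (hmem m1).mp (PySem.List.max?_mem h1)
    cases h2 : PySem.List.max? l2 (fun x => x) with
    | none => exact absurd hm1 (by simp [(PySem.List.max?_eq_none_iff _ _).mp h2])
    | some m2 =>
      have hle1 := PySem.List.max?_isMax h2 m1 hm1
      have hle2 := PySem.List.max?_isMax h1 m2 ((hmem m2).mpr (PySem.List.max?_mem h2))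
      simp only [Option.getD_some]
      exact le_antisymm hle1 hle2

theorem pvMinExt (l1 l2 : List Int) (hmem : ∀ x, x ∈ l1 ↔ x ∈ l2) :
    (PySem.List.min? l1 (fun x => x)).getD 0 = (PySem.List.min? l2 (fun x => x)).getD 0 := by
  cases h1 : PySem.List.min? l1 (fun x => x) with
  | none =>
    have hl1 : l1 = [] := (PySem.List.min?_eq_none_iff _ _).mp h1
    have hl2 : l2 = [] := by
      cases h : l2 with
      | nil => rfl
      | cons y t => exact absurd ((hmem y).mpr (h ▸ List.mem_cons_self ..)) (by simp [hl1])
    rw [(PySem.List.min?_eq_none_iff _ _).mpr hl2]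
  | some m1 =>
    have hm1 : m1 ∈ l2 := (hmem m1).mp (PySem.List.min?_mem h1)
    cases h2 : PySem.List.min? l2 (fun x => x) with
    | none => exact absurd hm1 (by simp [(PySem.List.min?_eq_none_iff _ _).mp h2])
    | some m2 =>
      have hle1 := PySem.List.min?_isMin h2 m1 hm1
      have hle2 := PySem.List.min?_isMin h1 m2 ((hmem m2).mpr (PySem.List.min?_mem h2))
      simp only [Option.getD_some]
      exact le_antisymm hle2 hle1

-- ===== VERDICT (by name: the statement is the Claim_ definition above) =====
theorem eroDil_Gray_spec : Claim_equal_eroDil_Gray := by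
  intro imgFile l k seFile n m word hDom hPre
  unfold Spec_eroDil_Gray eroDil_Gray eroDil_Gray_alt
  rw [pvParamsAlt]
  by_cases hg : l ≤ 0 ∨ k ≤ 0
  · rw [if_pos hg]
    rcases hg with hl | hk
    · rw [PySem.List.pyRange_one_eq_nil (by omega : l ≤ (0:Int))]
      simp
    · apply List.map_congr_left
      intro v _
      rw [PySem.List.pyRange_one_eq_nil (by omega : k ≤ (0:Int))]
      simp
  rw [if_neg hg]
  apply List.map_congr_left
  intro v hv
  apply List.map_congr_left
  intro h hh
  rw [PySem.List.mem_pyRange_one] at hv hh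
  have hmem : ∀ x : Int,
      (x ∈ (PySem.List.pyRange 0 ((pvParams n m).1 + 1) 1).foldl
        (fun acc i =>
          (PySem.List.pyRange 0 ((pvParams n m).2.1 + 1) 1).foldl
            (fun acc j => pvAstep seFile imgFile l k (pvParams n m).2.2.1 (pvParams n m).2.2.2 v h acc i j) acc) []) ↔
      (x ∈ ((PySem.List.pyRange (-(pvParams n m).1) ((pvParams n m).1 + 1) 1).flatMap fun di =>
        (PySem.List.pyRange (-(pvParams n m).2.1) ((pvParams n m).2.1 + 1) 1).filterMap fun dj =>
          if PySem.List.pyGetD (PySem.List.pyGetD seFile ((pvParams n m).2.2.1 + di) []) ((pvParams n m).2.2.2 + dj) 0 ≠ 0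
          then some (di, dj) else none).filterMap fun p =>
        if 0 ≤ v + p.1 ∧ v + p.1 < l ∧ 0 ≤ h + p.2 ∧ h + p.2 < k
        then some (PySem.List.pyGetD (PySem.List.pyGetD imgFile (v + p.1) []) (h + p.2) 0)
        else none) := by
    intro x
    rw [pvMemGrey, pvMemVals,
      pvBridge seFile imgFile l k (pvParams n m).1 (pvParams n m).2.1
        (pvParams n m).2.2.1 (pvParams n m).2.2.2 v h x hv.1 hv.2 hh.1 hh.2]
  by_cases hw : word == "d"
  · simp only [hw, if_pos]
    exact pvMaxExt _ _ hmem
  · simp only [hw, if_neg, Bool.false_eq_true, not_false_iff]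
    exact pvMinExt _ _ hmem
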